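-- pv_equiv track=rewrite | github.com/binbin-li/binbin-li.github.io | segmentation/word.py | DealSNE
-- ===== SOURCE A (Python) =====
-- def DealSNE(sent, symbs):
--     nlst = []
--     i = 0
--     while i < len(sent):
--         if sent[i] in symbs:
--             length = 0
--             while sent[i+length] in symbs:
--                 length += 1
--                 if i + length == len(sent):
--                     break
--             nlst += [sent[i:i+length]]
--             sent = sent[:i] + '@' + sent[i+length:]
--                 #This symbol help us to seperate it from others.
--         i += 1
--     return sent, nlst
-- ===== SOURCE B (Python) =====
-- def DealSNE(sent, symbs):
--     ss = set(symbs)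
--     out = []
--     runs = []
--     buf = []
--     for c in sent:
--         if c in ss:
--             buf.append(c)
--         else:
--             if buf:
--                 runs.append(''.join(buf))
--                 out.append('@')
--                 buf = []
--             out.append(c)
--     if buf:
--         runs.append(''.join(buf))
--         out.append('@')
--     return ''.join(out), runs
-- ===== Notes on version B (the rewrite author's own statement) =====
-- stated objective: faster
-- what changed: Replaced the index-based while loop that repeatedly slices and rebuilds the string (quadratic re-copying) with a single left-to-right pass that groups consecutive symbol characters into a buffer, using a set for membership and a final join.
import Mathlib
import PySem

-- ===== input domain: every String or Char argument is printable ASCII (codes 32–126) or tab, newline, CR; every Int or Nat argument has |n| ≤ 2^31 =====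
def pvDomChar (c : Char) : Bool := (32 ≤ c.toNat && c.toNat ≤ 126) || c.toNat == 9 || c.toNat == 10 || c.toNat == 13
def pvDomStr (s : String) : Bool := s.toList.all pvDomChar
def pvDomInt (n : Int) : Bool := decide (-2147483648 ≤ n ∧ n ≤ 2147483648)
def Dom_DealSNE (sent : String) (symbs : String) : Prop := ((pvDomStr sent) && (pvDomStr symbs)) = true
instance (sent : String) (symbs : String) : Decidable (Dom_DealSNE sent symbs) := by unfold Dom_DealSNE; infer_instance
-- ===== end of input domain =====

-- B replaces A's index-driven while loop that rebuilds the string by slicing on every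
-- symbol run with a single left-to-right pass buffering consecutive symbol characters.

-- ===== PORT A =====
-- inner while loop: `length = 0; while sent[i+length] in symbs: length += 1; if i+length == len(sent): break`
-- fuel is only a totality guard; with fuel ≥ sent.length - (i+length) it is never exhausted.
def aRun (fuel : Nat) (sent symbs : List Char) (i length : Nat) : Nat :=
  match fuel with
  | 0 => length
  | fuel + 1 =>
    if sent.getD (i + length) '?' ∈ symbs then
      let length := length + 1
      if i + length = sent.length then length
      else aRun fuel sent symbs i length
    else length

-- outer while loop over i, mutating sent and accumulating nlst; fuel is a totality guard.
-- the slices sent[i:i+length] and sent[:i] + '@' + sent[i+length:] are ported with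
-- take/drop, exact here because i and length are nonnegative.
def aLoop (fuel : Nat) (sent symbs : List Char) (i : Nat) (nlst : List (List Char)) :
    List Char × List (List Char) :=
  match fuel with
  | 0 => (sent, nlst)
  | fuel + 1 =>
    if i < sent.length then
      if sent.getD i '?' ∈ symbs then
        let length := aRun (sent.length - i) sent symbs i 0
        let nlst := nlst ++ [(sent.drop i).take length]
        let sent := sent.take i ++ '@' :: sent.drop (i + length)
        aLoop fuel sent symbs (i + 1) nlst
      else aLoop fuel sent symbs (i + 1) nlst
    else (sent, nlst)

def DealSNE (sent : String) (symbs : String) : String × List String :=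
  let r := aLoop sent.toList.length sent.toList symbs.toList 0 []
  (String.ofList r.1, r.2.map String.ofList)

-- ===== PORT B =====
-- the for-loop of Source B: state (out, runs, buf), then the final flush after the loop.
def bGo (symbs : List Char) (out : List Char) (runs : List (List Char)) (buf : List Char) :
    List Char → List Char × List (List Char)
  | [] => if buf.isEmpty then (out, runs) else (out ++ ['@'], runs ++ [buf])
  | c :: cs =>
    if c ∈ symbs then bGo symbs out runs (buf ++ [c]) cs
    else if buf.isEmpty then bGo symbs (out ++ [c]) runs [] cs
    else bGo symbs (out ++ ['@', c]) (runs ++ [buf]) [] cs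

def DealSNE_alt (sent : String) (symbs : String) : String × List String :=
  let ss := PySem.Set.ofList symbs.toList  -- set(symbs)
  let r := bGo ss [] [] [] sent.toList
  (String.ofList r.1, r.2.map String.ofList)

-- ===== PRECONDITION & SPEC =====
def Spec_DealSNE (sent : String) (symbs : String) (out : String × List String) : Prop := out = DealSNE_alt sent symbs
instance (sent : String) (symbs : String) (out : String × List String) : Decidable (Spec_DealSNE sent symbs out) := by unfold Spec_DealSNE; infer_instance

-- ===== CLAIM (what is proved, stated in full; the proofs are below) =====
def Claim_equal_DealSNE : Prop := ∀ (sent : String) (symbs : String), Dom_DealSNE sent symbs → Spec_DealSNE sent symbs (DealSNE sent symbs)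

-- ===== LEMMAS AND PROOFS =====

-- common reference function: replace each maximal run of characters satisfying p by '@',
-- collecting the runs in order
def fSpec (p : Char → Bool) : List Char → List Char × List (List Char)
  | [] => ([], [])
  | c :: cs =>
    if p c then
      let r := fSpec p (cs.dropWhile p)
      ('@' :: r.1, (c :: cs.takeWhile p) :: r.2)
    else
      let r := fSpec p cs
      (c :: r.1, r.2)
  termination_by l => l.length
  decreasing_by
    · exact Nat.lt_succ_of_le (List.length_dropWhile_le _ _)
    · simp

theorem take_takeWhile_length (p : Char → Bool) (l : List Char) :
    l.take (l.takeWhile p).length = l.takeWhile p := by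
  have h : (l.takeWhile p ++ l.dropWhile p).take (l.takeWhile p).length = l.takeWhile p :=
    List.take_left
  rwa [List.takeWhile_append_dropWhile] at h

theorem drop_takeWhile_length (p : Char → Bool) (l : List Char) :
    l.drop (l.takeWhile p).length = l.dropWhile p := by
  have h : (l.takeWhile p ++ l.dropWhile p).drop (l.takeWhile p).length = l.dropWhile p :=
    List.drop_left
  rwa [List.takeWhile_append_dropWhile] at h

theorem getD_append_cons (l : List Char) (c : Char) (r : List Char) (d : Char) :
    (l ++ c :: r).getD l.length d = c := by
  simp [List.getD_eq_getElem?_getD]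

theorem aRun_eq (symbs : List Char) : ∀ (fuel : Nat) (sent : List Char) (i length : Nat),
    i + length < sent.length → sent.length - (i + length) ≤ fuel →
    aRun fuel sent symbs i length =
      length + ((sent.drop (i + length)).takeWhile (fun c => decide (c ∈ symbs))).length := by
  intro fuel
  induction fuel with
  | zero => intro sent i length hlt hfuel; omega
  | succ fuel ih =>
    intro sent i length hlt hfuel
    have hdrop : sent.drop (i + length) = sent[i + length] :: sent.drop (i + length + 1) :=
      (List.getElem_cons_drop hlt).symm
    have hgetD : sent.getD (i + length) '?' = sent[i + length] := List.getD_eq_getElem sent '?' hlt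
    rw [aRun, hgetD]
    by_cases hc : sent[i + length] ∈ symbs
    · rw [if_pos hc]
      have htw : (sent.drop (i + length)).takeWhile (fun c => decide (c ∈ symbs)) =
          sent[i + length] :: (sent.drop (i + length + 1)).takeWhile (fun c => decide (c ∈ symbs)) := by
        rw [hdrop, List.takeWhile_cons]
        simp [hc]
      by_cases hend : i + (length + 1) = sent.length
      · rw [if_pos hend]
        have hnil : sent.drop (i + length + 1) = [] := by
          apply List.drop_eq_nil_of_le; omega
        rw [htw, hnil]
        simp
      · rw [if_neg hend]
        rw [ih sent i (length + 1) (by omega) (by omega)]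
        have h1 : i + (length + 1) = i + length + 1 := by omega
        rw [h1, htw]
        simp
        omega
    · rw [if_neg hc]
      have htw : (sent.drop (i + length)).takeWhile (fun c => decide (c ∈ symbs)) = [] := by
        rw [hdrop, List.takeWhile_cons]
        simp [hc]
      rw [htw]
      simp

theorem aLoop_eq (symbs : List Char) : ∀ (n fuel : Nat) (done rest : List Char)
    (nlst : List (List Char)), rest.length ≤ n → rest.length ≤ fuel →
    aLoop fuel (done ++ rest) symbs done.length nlst =
      (done ++ (fSpec (fun c => decide (c ∈ symbs)) rest).1,
       nlst ++ (fSpec (fun c => decide (c ∈ symbs)) rest).2) := by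
  intro n
  induction n with
  | zero =>
    intro fuel done rest nlst hn hf
    have : rest = [] := List.eq_nil_of_length_eq_zero (by omega)
    subst this
    cases fuel <;> simp [aLoop, fSpec]
  | succ n ih =>
    intro fuel done rest nlst hn hf
    cases rest with
    | nil => cases fuel <;> simp [aLoop, fSpec]
    | cons c cs =>
      cases fuel with
      | zero => simp at hf
      | succ fuel =>
        rw [aLoop]
        have hlen : done.length < (done ++ c :: cs).length := by simp
        rw [if_pos hlen, getD_append_cons]
        by_cases hc : c ∈ symbs
        · rw [if_pos hc]
          have hdropd : (done ++ c :: cs).drop done.length = c :: cs := List.drop_left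
          have hrun : aRun ((done ++ c :: cs).length - done.length) (done ++ c :: cs) symbs
              done.length 0 =
              ((c :: cs).takeWhile (fun x => decide (x ∈ symbs))).length := by
            rw [aRun_eq symbs _ _ _ _ (by simp) (by omega)]
            rw [Nat.add_zero, hdropd, Nat.zero_add]
          rw [hrun]
          simp only []
          have htake : ((done ++ c :: cs).drop done.length).take
              ((c :: cs).takeWhile (fun x => decide (x ∈ symbs))).length =
              (c :: cs).takeWhile (fun x => decide (x ∈ symbs)) := by
            rw [hdropd, take_takeWhile_length]
          rw [htake, List.take_left]
          have hdrop2 : (done ++ c :: cs).drop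
              (done.length + ((c :: cs).takeWhile (fun x => decide (x ∈ symbs))).length) =
              (c :: cs).dropWhile (fun x => decide (x ∈ symbs)) := by
            rw [← List.drop_drop, hdropd, drop_takeWhile_length]
          rw [hdrop2]
          have hsent : done ++ '@' :: (c :: cs).dropWhile (fun x => decide (x ∈ symbs)) =
              (done ++ ['@']) ++ (c :: cs).dropWhile (fun x => decide (x ∈ symbs)) := by
            simp
          have hidx : done.length + 1 = (done ++ ['@']).length := by simp
          rw [hsent, hidx]
          have hdw : (c :: cs).dropWhile (fun x => decide (x ∈ symbs)) =
              cs.dropWhile (fun x => decide (x ∈ symbs)) := by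
            rw [List.dropWhile_cons]
            simp [hc]
          have hlen1 : ((c :: cs).dropWhile (fun x => decide (x ∈ symbs))).length ≤ n := by
            rw [hdw]
            have := List.length_dropWhile_le (fun x => decide (x ∈ symbs)) cs
            simp at hn; omega
          have hlen2 : ((c :: cs).dropWhile (fun x => decide (x ∈ symbs))).length ≤ fuel := by
            rw [hdw]
            have := List.length_dropWhile_le (fun x => decide (x ∈ symbs)) cs
            simp at hf; omega
          rw [ih fuel (done ++ ['@']) _ _ hlen1 hlen2]
          rw [hdw]
          have htw : (c :: cs).takeWhile (fun x => decide (x ∈ symbs)) =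
              c :: cs.takeWhile (fun x => decide (x ∈ symbs)) := by
            rw [List.takeWhile_cons]
            simp [hc]
          rw [htw]
          simp [fSpec, hc]
        · rw [if_neg hc]
          have hsent : done ++ c :: cs = (done ++ [c]) ++ cs := by simp
          have hidx : done.length + 1 = (done ++ [c]).length := by simp
          rw [hsent, hidx]
          rw [ih fuel (done ++ [c]) cs nlst (by simp at hn; omega) (by simp at hf; omega)]
          simp [fSpec, hc]

theorem bGo_eq (S : List Char) : ∀ (rest : List Char),
    (∀ out runs, bGo S out runs [] rest =
      (out ++ (fSpec (fun c => decide (c ∈ S)) rest).1,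
       runs ++ (fSpec (fun c => decide (c ∈ S)) rest).2)) ∧
    (∀ buf out runs, buf ≠ [] → bGo S out runs buf rest =
      (out ++ '@' :: (fSpec (fun c => decide (c ∈ S)) (rest.dropWhile (fun c => decide (c ∈ S)))).1,
       runs ++ (buf ++ rest.takeWhile (fun c => decide (c ∈ S))) ::
         (fSpec (fun c => decide (c ∈ S)) (rest.dropWhile (fun c => decide (c ∈ S)))).2)) := by
  intro rest
  induction rest with
  | nil =>
    constructor
    · intro out runs; simp [bGo, fSpec]
    · intro buf out runs hbuf
      simp [bGo, fSpec, List.isEmpty_iff, hbuf]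
  | cons c cs ih =>
    constructor
    · intro out runs
      by_cases hc : c ∈ S
      · rw [show bGo S out runs [] (c :: cs) = bGo S out runs [c] cs from by
          simp [bGo, hc]]
        rw [ih.2 [c] out runs (by simp)]
        simp [fSpec, hc]
      · rw [show bGo S out runs [] (c :: cs) = bGo S (out ++ [c]) runs [] cs from by
          simp [bGo, hc]]
        rw [ih.1 (out ++ [c]) runs]
        simp [fSpec, hc]
    · intro buf out runs hbuf
      by_cases hc : c ∈ S
      · rw [show bGo S out runs buf (c :: cs) = bGo S out runs (buf ++ [c]) cs from by
          simp [bGo, hc]]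
        rw [ih.2 (buf ++ [c]) out runs (by simp)]
        simp [hc]
      · rw [show bGo S out runs buf (c :: cs) = bGo S (out ++ ['@', c]) (runs ++ [buf]) [] cs from by
          simp [bGo, hc, List.isEmpty_iff, hbuf]]
        rw [ih.1 (out ++ ['@', c]) (runs ++ [buf])]
        simp [fSpec, hc]

-- ===== VERDICT (by name: the statement is the Claim_ definition above) =====
theorem DealSNE_spec : Claim_equal_DealSNE := by
  intro sent symbs _
  unfold Spec_DealSNE DealSNE DealSNE_alt
  have hA := aLoop_eq symbs.toList sent.toList.length sent.toList.length [] sent.toList []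
    le_rfl le_rfl
  have hB := (bGo_eq (PySem.Set.ofList symbs.toList) sent.toList).1 [] []
  have hp : (fun c => decide (c ∈ PySem.Set.ofList symbs.toList)) =
      (fun c => decide (c ∈ symbs.toList)) := by
    funext c; simp [PySem.Set.mem_ofList]
  simp only [List.nil_append, List.length_nil] at hA hB
  rw [hp] at hB
  simp only [hA, hB]
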